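-- pv_equiv track=rewrite | github.com/jonnysassoon/Projects | DataStructuresAndAlgorithms/MiscAlgs/RecursionIntro.py | count_lowercase
-- ===== SOURCE A (Python) =====
-- def count_lowercase(s, low, high):
--     """
--     Returns the number of lowercase letters in a string over a given interval [low, high]
--     :param s: input string
--     :return: number of lowercase
--     """
--     if low == high:
--         if s[low].islower():
--             return 1
--         else:
--             return 0
--     else:
--         if s[high].islower():
--             return count_lowercase(s, low, high-1)+1
--         else:
--             return count_lowercase(s, low, high-1)
-- ===== SOURCE B (Python) =====
-- def count_lowercase(s, low, high):
--     """
--     Returns the number of lowercase letters in a string over a given interval [low, high]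
--     :param s: input string
--     :return: number of lowercase
--     """
--     count = 0
--     i = low
--     while True:
--         if s[i].islower():
--             count += 1
--         if i == high:
--             return count
--         i += 1
-- ===== Notes on version B (the rewrite author's own statement) =====
-- stated objective: alternative
-- what changed: Replaces the non-tail recursion that peels the interval from the high end with an ascending iterative accumulator loop from the low end, O(1) stack instead of O(high-low) recursion depth.
import Mathlib
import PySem

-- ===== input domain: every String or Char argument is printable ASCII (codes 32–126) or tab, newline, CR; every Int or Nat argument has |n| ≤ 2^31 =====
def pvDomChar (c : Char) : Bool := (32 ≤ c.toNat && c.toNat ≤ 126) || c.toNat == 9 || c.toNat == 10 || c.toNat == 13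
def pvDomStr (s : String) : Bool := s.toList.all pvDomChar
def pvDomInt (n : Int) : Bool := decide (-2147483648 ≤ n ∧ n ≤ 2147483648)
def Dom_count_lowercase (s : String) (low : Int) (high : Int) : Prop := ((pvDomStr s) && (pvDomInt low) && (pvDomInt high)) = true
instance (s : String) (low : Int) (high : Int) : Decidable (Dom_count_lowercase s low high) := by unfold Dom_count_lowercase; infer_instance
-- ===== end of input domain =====

-- B replaces A's descending non-tail recursion with an ascending accumulator loop (O(1) stack); return values agree on Pre_.


-- ===== PORT A =====
-- A's recursion, with fuel = interval length + 1 to make the port total: on Pre_ the fuel never runs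
-- out; where the Python raises (an out-of-range index, i.e. pyGet? = none, or exhausted fuel because
-- low > high) the port returns 0 — those inputs are outside Pre_.
def count_lowercase_goA (s : String) (low : Int) : Nat → Int → Int
  | 0, _ => 0
  | fuel + 1, high =>
    if low = high then
      match PySem.Str.pyGet? s low with
      | some c => if PySem.Chars.islower c then 1 else 0
      | none => 0
    else
      match PySem.Str.pyGet? s high with
      | some c =>
        if PySem.Chars.islower c then count_lowercase_goA s low fuel (high - 1) + 1
        else count_lowercase_goA s low fuel (high - 1)
      | none => 0

def count_lowercase (s : String) (low : Int) (high : Int) : Int :=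
  count_lowercase_goA s low ((high - low).toNat + 1) high

-- ===== PORT B =====
-- B's 'while True' loop: count' is the count after this iteration's islower test; the loop returns
-- when i reaches high, else advances i. Same fuel convention as port A (on Pre_ it never runs out;
-- where B's Python raises IndexError, pyGet? = none and the iteration leaves count unchanged — outside Pre_).
def count_lowercase_goB (s : String) (high : Int) : Nat → Int → Int → Int
  | 0, _, count => count
  | fuel + 1, i, count =>
    let count' :=
      match PySem.Str.pyGet? s i with
      | some c => if PySem.Chars.islower c then count + 1 else count
      | none => count
    if i = high then count' else count_lowercase_goB s high fuel (i + 1) count'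

def count_lowercase_alt (s : String) (low : Int) (high : Int) : Int :=
  count_lowercase_goB s high ((high - low).toNat + 1) low 0

-- ===== PRECONDITION & SPEC =====
-- Pre_ is exactly where the Python A returns: low ≤ high and every accessed index low..high a valid
-- Python index (otherwise A raises IndexError, or RecursionError when low > high; B raises there too).
def Pre_count_lowercase (s : String) (low : Int) (high : Int) : Prop :=
  low ≤ high ∧ PySem.Raise.InRange s.length low ∧ PySem.Raise.InRange s.length high
instance (s : String) (low : Int) (high : Int) : Decidable (Pre_count_lowercase s low high) := by
  unfold Pre_count_lowercase; infer_instance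

def pvWitness_count_lowercase : String × Int × Int := ("aB c", 0, 3)

def Spec_count_lowercase (s : String) (low : Int) (high : Int) (out : Int) : Prop :=
  out = count_lowercase_alt s low high
instance (s : String) (low : Int) (high : Int) (out : Int) : Decidable (Spec_count_lowercase s low high out) := by
  unfold Spec_count_lowercase; infer_instance

-- ===== CLAIM (what is proved, stated in full; the proofs are below) =====
def Claim_equal_count_lowercase : Prop :=
  ∀ (s : String) (low : Int) (high : Int), Dom_count_lowercase s low high →
    Pre_count_lowercase s low high →
    Spec_count_lowercase s low high (count_lowercase s low high)

-- ===== LEMMAS AND PROOFS =====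

-- Common reference value both ports are reduced to: the 0/1-sum of islower over the interval.
def pvCount (s : String) (low : Int) (high : Int) : Int :=
  (PySem.List.pyRange low (high + 1) 1).foldl
    (fun acc i =>
      match PySem.List.pyGet? s.toList i with
      | some c => if PySem.Chars.islower c then acc + 1 else acc
      | none => acc) 0

theorem pvCount_foldl_shift (s : String) (l : List Int) (a : Int) :
    l.foldl (fun acc i =>
      match PySem.List.pyGet? s.toList i with
      | some c => if PySem.Chars.islower c then acc + 1 else acc
      | none => acc) a
    = a + l.foldl (fun acc i =>
      match PySem.List.pyGet? s.toList i with
      | some c => if PySem.Chars.islower c then acc + 1 else acc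
      | none => acc) 0 := by
  induction l generalizing a with
  | nil => simp
  | cons x xs ih =>
    simp only [List.foldl_cons]
    cases hg : PySem.List.pyGet? s.toList x with
    | none => exact ih a
    | some c =>
      simp only [hg]
      split
      · rw [ih (a + 1), ih (0 + 1)]; omega
      · exact ih a

theorem pyGet?_some_of_inRange (s : String) (i : Int)
    (h : PySem.Raise.InRange s.length i) :
    ∃ c, PySem.List.pyGet? s.toList i = some c := by
  cases hg : PySem.List.pyGet? s.toList i with
  | none =>
    exact absurd (by simpa using h) (by simpa using (PySem.List.pyGet?_eq_none_iff _ _).mp hg)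
  | some c => exact ⟨c, rfl⟩

theorem goA_eq_pvCount (s : String) (low : Int) :
    ∀ (n : Nat) (high : Int), high - low = n →
      PySem.Raise.InRange s.length low → PySem.Raise.InRange s.length high →
      count_lowercase_goA s low (n + 1) high = pvCount s low high := by
  intro n
  induction n with
  | zero =>
    intro high hn hlo hhi
    have hlh : low = high := by omega
    obtain ⟨c, hc⟩ := pyGet?_some_of_inRange s low hlo
    subst hlh
    simp [count_lowercase_goA, pvCount, PySem.Str.pyGet?, hc,
      PySem.List.pyRange_one_singleton]
  | succ n ih =>
    intro high hn hlo hhi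
    have hlt : low < high := by omega
    obtain ⟨c, hc⟩ := pyGet?_some_of_inRange s high hhi
    have hhi' : PySem.Raise.InRange s.length (high - 1) := by
      unfold PySem.Raise.InRange at *
      omega
    have hrec := ih (high - 1) (by omega) hlo hhi'
    have hsplit : PySem.List.pyRange low (high + 1) 1
        = PySem.List.pyRange low high 1 ++ [high] := by
      simpa using PySem.List.pyRange_one_succ_right (a := low) (b := high) (by omega)
    have halt : pvCount s low high
        = (if PySem.Chars.islower c then pvCount s low (high - 1) + 1
           else pvCount s low (high - 1)) := by
      unfold pvCount
      rw [hsplit]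
      have h1 : PySem.List.pyRange low ((high - 1) + 1) 1 = PySem.List.pyRange low high 1 := by
        norm_num
      rw [h1, List.foldl_append]
      simp [hc]
    rw [halt]
    unfold count_lowercase_goA
    rw [if_neg (by omega)]
    simp only [PySem.Str.pyGet?, PySem.Chars.pyGet?_eq_listPyGet?, hc]
    split <;> simp [hrec]

theorem goB_eq_pvCount (s : String) (high : Int) :
    ∀ (n : Nat) (i acc : Int), high - i = n →
      PySem.Raise.InRange s.length i → PySem.Raise.InRange s.length high →
      count_lowercase_goB s high (n + 1) i acc = acc + pvCount s i high := by
  intro n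
  induction n with
  | zero =>
    intro i acc hn hi hhi
    have hih : i = high := by omega
    obtain ⟨c, hc⟩ := pyGet?_some_of_inRange s i hi
    subst hih
    simp only [count_lowercase_goB, PySem.Str.pyGet?, PySem.Chars.pyGet?_eq_listPyGet?, hc]
    simp [pvCount, PySem.List.pyRange_one_singleton, hc]
    split <;> ring
  | succ n ih =>
    intro i acc hn hi hhi
    have hlt : i < high := by omega
    obtain ⟨c, hc⟩ := pyGet?_some_of_inRange s i hi
    have hi' : PySem.Raise.InRange s.length (i + 1) := by
      unfold PySem.Raise.InRange at *
      omega
    have hcons : PySem.List.pyRange i (high + 1) 1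
        = i :: PySem.List.pyRange (i + 1) (high + 1) 1 :=
      PySem.List.pyRange_one_cons (by omega)
    have hpeel : pvCount s i high
        = (if PySem.Chars.islower c then (1:Int) else 0) + pvCount s (i + 1) high := by
      unfold pvCount
      rw [hcons, List.foldl_cons]
      simp only [hc]
      rw [pvCount_foldl_shift]
      split <;> simp
    unfold count_lowercase_goB
    rw [if_neg (by omega)]
    simp only [PySem.Str.pyGet?, PySem.Chars.pyGet?_eq_listPyGet?, hc]
    rw [ih (i + 1) _ (by omega) hi' hhi, hpeel]
    split <;> ring

-- ===== VERDICT (by name: the statement is the Claim_ definition above) =====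
theorem count_lowercase_spec : Claim_equal_count_lowercase := by
  intro s low high _ hpre
  obtain ⟨hle, hlo, hhi⟩ := hpre
  unfold Spec_count_lowercase count_lowercase count_lowercase_alt
  have hn : high - low = ((high - low).toNat : Int) := by omega
  rw [goA_eq_pvCount s low (high - low).toNat high (by omega) hlo hhi,
    goB_eq_pvCount s high (high - low).toNat low 0 (by omega) hlo hhi]
  ring
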